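-- pv_equiv track=rewrite | github.com/alperenkarakaya/ai_word_generator | text_utils.py | tokenize_with_sentences
-- ===== SOURCE A (Python) =====
-- from typing import List, Tuple
--
-- def tokenize_with_sentences(text: str) -> Tuple[List[str], List[int]]:
--     """
--     Metni tokenize eder ve her tokenin hangi cümleye ait olduğunu işaretler.
--     Noktalama işaretleri kelimeye YAPIŞIK olarak işlenir.
--
--     Args:
--         text: Tokenize edilecek metin
--
--     Returns:
--         (tokens, sentence_ids) tuple
--         - tokens: kelime listesi (noktalama yapışık: "gitti." gibi)
--         - sentence_ids: her kelimenin hangi cümleye ait olduğu (0, 1, 2, ...)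
--     """
--     tokens = []
--     sentence_ids = []
--     current_sentence_id = 0
--
--     # Kelimeleri ayır (noktalama yapışık kalacak)
--     words = text.split()
--
--     for word in words:
--         tokens.append(word)
--         sentence_ids.append(current_sentence_id)
--
--         # Eğer kelime cümle bitirici ile bitiyorsa, sonraki kelime yeni cümle
--         if word.endswith('.') or word.endswith('!') or word.endswith('?'):
--             current_sentence_id += 1
--
--     return tokens, sentence_ids
-- ===== SOURCE B (Python) =====
-- from typing import List, Tuple
--
-- def tokenize_with_sentences(text: str) -> Tuple[List[str], List[int]]:
--     # Different decomposition: tokenize, group tokens into sentences,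
--     # then number the groups and flatten the numbering.
--     tokens = text.split()
--     sentences = []
--     cur = []
--     for t in tokens:
--         cur.append(t)
--         if t.endswith(('.', '!', '?')):
--             sentences.append(cur)
--             cur = []
--     if cur:
--         sentences.append(cur)
--     sentence_ids = [i for i, s in enumerate(sentences) for _ in s]
--     return tokens, sentence_ids
-- ===== Notes on version B (the rewrite author's own statement) =====
-- stated objective: alternative
-- what changed: B replaces A's single loop that threads a running sentence counter with a group-then-number decomposition: it partitions the tokens into sentence groups and flattens an enumerated numbering of the groups into the id list.
import Mathlib
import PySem

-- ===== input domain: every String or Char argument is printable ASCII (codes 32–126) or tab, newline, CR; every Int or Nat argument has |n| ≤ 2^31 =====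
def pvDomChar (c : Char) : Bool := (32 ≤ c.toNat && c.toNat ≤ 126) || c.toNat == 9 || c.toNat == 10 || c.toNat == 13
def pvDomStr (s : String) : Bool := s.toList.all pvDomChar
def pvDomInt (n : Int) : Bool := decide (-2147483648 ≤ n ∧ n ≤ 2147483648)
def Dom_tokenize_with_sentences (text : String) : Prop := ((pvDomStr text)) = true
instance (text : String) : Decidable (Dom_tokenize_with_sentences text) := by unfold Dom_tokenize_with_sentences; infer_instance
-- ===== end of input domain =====

-- B groups tokens into sentences and numbers the groups instead of threading A's running counter; same output, similar cost (objective: alternative).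

-- ===== PORT A =====
def pyIsEndA (w : String) : Bool :=
  PySem.Str.endswith w "." || PySem.Str.endswith w "!" || PySem.Str.endswith w "?"

def loopA : List String → List String → List Int → Int → List String × List Int
  | [], toks, ids, _ => (toks, ids)
  | w :: ws, toks, ids, c =>
      loopA ws (toks ++ [w]) (ids ++ [c]) (if pyIsEndA w then c + 1 else c)

def tokenize_with_sentences (text : String) : List String × List Int :=
  loopA (PySem.Str.split₀ text) [] [] 0

-- ===== PORT B =====
def pyIsEndB (w : String) : Bool :=
  PySem.Str.endswith w "." || PySem.Str.endswith w "!" || PySem.Str.endswith w "?"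

def groupsB : List String → List String → List (List String)
  | cur, [] => if cur.isEmpty then [] else [cur]
  | cur, t :: ts => if pyIsEndB t then (cur ++ [t]) :: groupsB [] ts else groupsB (cur ++ [t]) ts

def idsB : Int → List (List String) → List Int
  | _, [] => []
  | i, g :: gs => g.map (fun _ => i) ++ idsB (i + 1) gs

def tokenize_with_sentences_alt (text : String) : List String × List Int :=
  let tokens := PySem.Str.split₀ text
  (tokens, idsB 0 (groupsB [] tokens))

-- ===== PRECONDITION & SPEC =====
def Spec_tokenize_with_sentences (text : String) (out : List String × List Int) : Prop := out = tokenize_with_sentences_alt text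
instance (text : String) (out : List String × List Int) : Decidable (Spec_tokenize_with_sentences text out) := by unfold Spec_tokenize_with_sentences; infer_instance

-- ===== CLAIM (what is proved, stated in full; the proofs are below) =====
def Claim_equal_tokenize_with_sentences : Prop := ∀ (text : String), Dom_tokenize_with_sentences text → Spec_tokenize_with_sentences text (tokenize_with_sentences text)

-- ===== LEMMAS AND PROOFS =====

-- the ids of a group list started mid-sentence with `cur`: each `cur` token gets id c, the rest is as from an empty cur
lemma idsB_groupsB (ws : List String) : ∀ (cur : List String) (c : Int),
    idsB c (groupsB cur ws) = cur.map (fun _ => c) ++ idsB c (groupsB [] ws) := by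
  induction ws with
  | nil =>
      intro cur c
      cases cur with
      | nil => simp [groupsB]
      | cons a l => simp [groupsB, idsB]
  | cons t ts ih =>
      intro cur c
      by_cases h : pyIsEndB t = true
      · simp [groupsB, h, idsB, List.map_append]
      · rw [show groupsB cur (t :: ts) = groupsB (cur ++ [t]) ts from by simp [groupsB, h],
           show groupsB [] (t :: ts) = groupsB [t] ts from by simp [groupsB, h]]
        rw [ih (cur ++ [t]) c, ih [t] c]
        simp [List.map_append]

-- A's loop computes appended tokens plus the flattened numbering of B's groups
lemma loopA_eq (ws : List String) : ∀ (toks : List String) (ids : List Int) (c : Int),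
    loopA ws toks ids c = (toks ++ ws, ids ++ idsB c (groupsB [] ws)) := by
  induction ws with
  | nil => intro toks ids c; simp [loopA, groupsB, idsB]
  | cons w ws ih =>
      intro toks ids c
      by_cases h : pyIsEndA w = true
      · have hb : pyIsEndB w = true := h
        simp [loopA, h, ih, groupsB, hb, idsB]
      · have hb : ¬ pyIsEndB w = true := h
        simp only [loopA, if_neg h, ih]
        rw [show groupsB [] (w :: ws) = groupsB [w] ws from by simp [groupsB, hb],
           idsB_groupsB ws [w] c]
        simp

-- ===== VERDICT (by name: the statement is the Claim_ definition above) =====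
theorem tokenize_with_sentences_spec : Claim_equal_tokenize_with_sentences := by
  intro text _
  unfold Spec_tokenize_with_sentences tokenize_with_sentences tokenize_with_sentences_alt
  rw [loopA_eq]
  simp
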